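-- pv_equiv track=rewrite | github.com/frank8ai/openclaw-dev | scripts/top1_readiness.py | _status_tokens
-- ===== SOURCE A (Python) =====
-- from typing import Any, Dict, List, Tuple
--
-- def _status_tokens(status_raw: object) -> List[str]:
--     if isinstance(status_raw, list):
--         tokens: List[str] = []
--         for item in status_raw:
--             if isinstance(item, str):
--                 cleaned = item.strip()
--                 if cleaned:
--                     tokens.append(cleaned)
--         return tokens
--     if not isinstance(status_raw, str):
--         return []
--     return [item.strip() for item in status_raw.split(",") if item.strip()]
-- ===== SOURCE B (Python) =====
-- from typing import List
--
-- def _status_tokens(status_raw: object) -> List[str]: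
--     if isinstance(status_raw, list):
--         return [c for item in status_raw if isinstance(item, str)
--                 for c in [item.strip()] if c]
--     if not isinstance(status_raw, str):
--         return []
--     # single pass over the characters: accumulate the current token,
--     # flush (strip + keep if non-empty) on each comma and at the end
--     tokens: List[str] = []
--     cur: List[str] = []
--     for ch in status_raw:
--         if ch == ',':
--             t = ''.join(cur).strip()
--             if t:
--                 tokens.append(t)
--             cur = []
--         else:
--             cur.append(ch)
--     t = ''.join(cur).strip()
--     if t:
--         tokens.append(t)
--     return tokens
-- ===== Notes on version B (the rewrite author's own statement) =====
-- stated objective: alternative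
-- what changed: For string input B replaces split-then-strip/filter (which materialises the raw comma pieces) with a single character-level scan that accumulates the current token and flushes a stripped non-empty token at each comma and at the end; the list branch becomes one comprehension.
import Mathlib
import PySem

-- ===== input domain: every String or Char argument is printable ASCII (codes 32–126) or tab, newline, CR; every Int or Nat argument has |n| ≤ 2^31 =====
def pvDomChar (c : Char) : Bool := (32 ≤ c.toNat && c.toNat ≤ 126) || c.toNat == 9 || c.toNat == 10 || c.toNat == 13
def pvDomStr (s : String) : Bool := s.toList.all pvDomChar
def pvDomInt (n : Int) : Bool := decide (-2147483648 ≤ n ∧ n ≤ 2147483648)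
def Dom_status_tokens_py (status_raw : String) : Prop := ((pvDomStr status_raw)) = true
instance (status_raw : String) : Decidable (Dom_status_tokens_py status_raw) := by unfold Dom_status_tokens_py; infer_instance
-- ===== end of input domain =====

-- B replaces A's split-then-strip/filter with a single character-level scan (alternative
-- decomposition, same cost). With a String argument only A's str branch is reachable, so the
-- ports transcribe that path.

-- ===== PORT A =====
-- returns [item.strip() for item in status_raw.split(",") if item.strip()]
def status_tokens_py (status_raw : String) : List String :=
  ((PySem.Chars.splitOn status_raw.toList [',']).filter
      (fun item => !(PySem.Chars.strip item).isEmpty)).map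
    (fun item => String.ofList (PySem.Chars.strip item))

-- ===== PORT B =====
-- one loop step of the scanner: flush the stripped current token at a comma, else extend it
def pvScanStep (st : List String × List Char) (ch : Char) : List String × List Char :=
  if ch = ',' then
    let t := PySem.Chars.strip st.2
    (if t.isEmpty then st.1 else st.1 ++ [String.ofList t], [])
  else (st.1, st.2 ++ [ch])

def status_tokens_py_alt (status_raw : String) : List String :=
  let st := status_raw.toList.foldl pvScanStep ([], [])
  let t := PySem.Chars.strip st.2
  if t.isEmpty then st.1 else st.1 ++ [String.ofList t]

-- ===== PRECONDITION & SPEC =====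
def Spec_status_tokens_py (status_raw : String) (out : List String) : Prop := out = status_tokens_py_alt status_raw
instance (status_raw : String) (out : List String) : Decidable (Spec_status_tokens_py status_raw out) := by unfold Spec_status_tokens_py; infer_instance

-- ===== CLAIM (what is proved, stated in full; the proofs are below) =====
def Claim_equal_status_tokens_py : Prop := ∀ (status_raw : String), Dom_status_tokens_py status_raw → Spec_status_tokens_py status_raw (status_tokens_py status_raw)

-- ===== LEMMAS AND PROOFS =====

-- simple reference split on ',' used to relate the two ports
def pvSplitC : List Char → List (List Char)
  | [] => [[]]
  | c :: rest =>
    if c = ',' then [] :: pvSplitC rest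
    else
      match pvSplitC rest with
      | h :: t => (c :: h) :: t
      | [] => [[c]]

-- strip+filter+map cleanup, the common normal form of both ports
def pvClean (xs : List (List Char)) : List String :=
  (xs.filter (fun item => !(PySem.Chars.strip item).isEmpty)).map
    (fun item => String.ofList (PySem.Chars.strip item))

def pvConsHead (cur : List Char) : List (List Char) → List (List Char)
  | h :: t => (cur ++ h) :: t
  | [] => [cur]

lemma pvSplitC_ne_nil (l : List Char) : pvSplitC l ≠ [] := by
  cases l with
  | nil => simp [pvSplitC]
  | cons c rest =>
    simp only [pvSplitC]
    split_ifs
    · simp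
    · cases h : pvSplitC rest <;> simp

lemma pvGo_comma (fuel : Nat) : ∀ (l cur : List Char) (acc : List (List Char)),
    l.length < fuel →
    PySem.Chars.splitOn.go [','] fuel l cur acc
      = acc.reverse ++ pvConsHead cur.reverse (pvSplitC l) := by
  induction fuel with
  | zero => intro l cur acc h; omega
  | succ n ih =>
    intro l cur acc h
    cases l with
    | nil =>
      simp [PySem.Chars.splitOn.go, pvSplitC, pvConsHead]
    | cons c rest =>
      by_cases hc : c = ','
      · subst hc
        have hpre : [','].isPrefixOf (',' :: rest) = true := by
          simp [List.isPrefixOf]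
        rw [PySem.Chars.splitOn.go]
        simp only [hpre, if_true, List.length_cons, List.length_nil, List.drop_succ_cons, List.drop_zero]
        rw [ih rest [] (cur.reverse :: acc) (by simp at h; omega)]
        have hne := pvSplitC_ne_nil rest
        cases hs : pvSplitC rest with
        | nil => exact absurd hs hne
        | cons h' t' =>
          simp [pvSplitC, pvConsHead, hs]
      · have hpre : [','].isPrefixOf (c :: rest) = false := by
          simp [List.isPrefixOf]
          exact fun h => absurd h.symm hc
        rw [PySem.Chars.splitOn.go]
        simp only [hpre, Bool.false_eq_true, if_false]
        rw [ih rest (c :: cur) acc (by simp at h ⊢; omega)]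
        have hne := pvSplitC_ne_nil rest
        cases hs : pvSplitC rest with
        | nil => exact absurd hs hne
        | cons h' t' =>
          simp [pvSplitC, pvConsHead, hs, hc]

lemma pvSplitOn_eq (l : List Char) : PySem.Chars.splitOn l [','] = pvSplitC l := by
  unfold PySem.Chars.splitOn
  rw [pvGo_comma (l.length + 1) l [] [] (by omega)]
  have hne := pvSplitC_ne_nil l
  cases hs : pvSplitC l with
  | nil => exact absurd hs hne
  | cons h t => simp [pvConsHead]

lemma pvScan_eq (l : List Char) : ∀ (tokens : List String) (cur : List Char),
    (let st := l.foldl pvScanStep (tokens, cur)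
     let t := PySem.Chars.strip st.2
     if t.isEmpty then st.1 else st.1 ++ [String.ofList t])
      = tokens ++ pvClean (pvConsHead cur (pvSplitC l)) := by
  induction l with
  | nil =>
    intro tokens cur
    simp only [List.foldl_nil, pvSplitC, pvConsHead, pvClean, List.append_nil,
      List.filter]
    by_cases h : (PySem.Chars.strip cur).isEmpty <;> simp [h]
  | cons c rest ih =>
    intro tokens cur
    by_cases hc : c = ','
    · subst hc
      simp only [List.foldl_cons, pvScanStep, if_true]
      rw [ih]
      have hne := pvSplitC_ne_nil rest
      cases hs : pvSplitC rest with
      | nil => exact absurd hs hne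
      | cons h' t' =>
        simp only [pvSplitC, if_true, pvConsHead, hs, List.append_nil, pvClean,
          List.filter]
        by_cases h : (PySem.Chars.strip cur).isEmpty <;>
          simp [h]
    · simp only [List.foldl_cons, pvScanStep, hc, if_false]
      rw [ih]
      have hne := pvSplitC_ne_nil rest
      cases hs : pvSplitC rest with
      | nil => exact absurd hs hne
      | cons h' t' =>
        simp [pvSplitC, hc, hs, pvConsHead, List.append_assoc]

-- ===== VERDICT (by name: the statement is the Claim_ definition above) =====
theorem status_tokens_py_spec : Claim_equal_status_tokens_py := by
  intro s _
  show status_tokens_py s = status_tokens_py_alt s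
  unfold status_tokens_py status_tokens_py_alt
  rw [pvSplitOn_eq, pvScan_eq s.toList [] []]
  have hne := pvSplitC_ne_nil s.toList
  cases hs : pvSplitC s.toList with
  | nil => exact absurd hs hne
  | cons h t => simp [pvConsHead, pvClean]
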